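-- pv_equiv track=rewrite | github.com/The1stRule/GOA-homeworks | day 0036/homework/homework.py | manual_replace
-- ===== SOURCE A (Python) =====
-- def manual_replace(words_list,old_element,new_element):
--     words = " ".join(words_list)
--     result = []
--     string = ""
--     for i in words:
--         if i == " ":
--             result.append(string)
--             string = ""
--         elif i == old_element:
--             string += new_element
--         else:
--             string += i
--     result.append(string)
--     return result
-- ===== SOURCE B (Python) =====
-- def manual_replace(words_list, old_element, new_element):
--     joined = " ".join(words_list)
--     return ["".join(new_element if c == old_element else c for c in word)
--             for word in joined.split(" ")]
-- ===== Notes on version B (the rewrite author's own statement) =====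
-- stated objective: simpler
-- what changed: Instead of A's single flat scan over the joined string that detects spaces inline while mutating a result list and a growing accumulator string, B splits the joined string on ' ' with str.split and rebuilds each word with a per-character comprehension.
import Mathlib
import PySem

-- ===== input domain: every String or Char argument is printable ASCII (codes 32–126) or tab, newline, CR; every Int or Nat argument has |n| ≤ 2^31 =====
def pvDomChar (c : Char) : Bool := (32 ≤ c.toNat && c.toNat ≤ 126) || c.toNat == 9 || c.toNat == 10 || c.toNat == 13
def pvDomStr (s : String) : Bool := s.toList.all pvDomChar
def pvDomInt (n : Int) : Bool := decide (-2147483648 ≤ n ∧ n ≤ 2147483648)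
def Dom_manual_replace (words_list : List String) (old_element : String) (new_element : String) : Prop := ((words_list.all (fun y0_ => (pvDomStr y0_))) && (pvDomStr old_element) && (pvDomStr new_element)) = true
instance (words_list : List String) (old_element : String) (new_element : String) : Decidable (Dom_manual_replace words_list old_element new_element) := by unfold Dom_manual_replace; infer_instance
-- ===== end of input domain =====

-- B replaces A's flat scan (inline space detection with a mutating accumulator) by split-on-space
-- followed by a per-word character rebuild; same cost, simpler decomposition.


-- ===== PORT A =====
-- for-loop over the joined string; state = (result, string); characters kept as List Char.
def manual_replace (words_list : List String) (old_element : String) (new_element : String) : List String :=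
  let words := PySem.Str.join " " words_list
  let fin := words.toList.foldl
    (fun (st : List (List Char) × List Char) (i : Char) =>
      if i = ' ' then (st.1 ++ [st.2], [])
      else if old_element.toList = [i] then (st.1, st.2 ++ new_element.toList)
      else (st.1, st.2 ++ [i]))
    ([], [])
  (fin.1 ++ [fin.2]).map String.ofList

-- ===== PORT B =====
def manual_replace_alt (words_list : List String) (old_element : String) (new_element : String) : List String :=
  let joined := PySem.Str.join " " words_list
  (PySem.Chars.splitOn joined.toList [' ']).map
    (fun word => String.ofList (word.flatMap
      (fun c => if old_element.toList = [c] then new_element.toList else [c])))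

-- ===== PRECONDITION & SPEC =====
def Spec_manual_replace (words_list : List String) (old_element : String) (new_element : String) (out : List String) : Prop := out = manual_replace_alt words_list old_element new_element
instance (words_list : List String) (old_element : String) (new_element : String) (out : List String) : Decidable (Spec_manual_replace words_list old_element new_element out) := by unfold Spec_manual_replace; infer_instance

-- ===== CLAIM (what is proved, stated in full; the proofs are below) =====
def Claim_equal_manual_replace : Prop := ∀ (words_list : List String) (old_element : String) (new_element : String), Dom_manual_replace words_list old_element new_element → Spec_manual_replace words_list old_element new_element (manual_replace words_list old_element new_element)

-- ===== LEMMAS AND PROOFS =====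

-- structural form of splitting a char list on ' '
def pvSplit (cur : List Char) : List Char → List (List Char)
  | [] => [cur]
  | c :: rest => if c = ' ' then cur :: pvSplit [] rest else pvSplit (cur ++ [c]) rest

-- merged split-and-replace computation shared by both proofs
def pvOut (repl : Char → List Char) (cur : List Char) : List Char → List (List Char)
  | [] => [cur]
  | c :: rest => if c = ' ' then cur :: pvOut repl [] rest else pvOut repl (cur ++ repl c) rest

theorem pvGo_eq : ∀ (fuel : Nat) (l cur : List Char) (accL : List (List Char)), l.length ≤ fuel →
    PySem.Chars.splitOn.go [' '] fuel l cur accL = accL.reverse ++ pvSplit cur.reverse l := by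
  intro fuel
  induction fuel with
  | zero =>
    intro l cur accL h
    have : l = [] := List.length_eq_zero_iff.mp (Nat.le_zero.mp h)
    subst this
    simp [PySem.Chars.splitOn.go, pvSplit]
  | succ n ih =>
    intro l cur accL h
    cases l with
    | nil => simp [PySem.Chars.splitOn.go, pvSplit]
    | cons c rest =>
      by_cases hsp : c = ' '
      · rw [PySem.Chars.splitOn.go]
        simp only [List.isPrefixOf, hsp, BEq.rfl, Bool.true_and, if_pos, List.length_cons,
          List.length_nil, List.drop_succ_cons, List.drop_zero]
        rw [ih rest [] (cur.reverse :: accL) (by simpa using Nat.le_of_succ_le_succ h)]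
        simp [pvSplit]
      · rw [PySem.Chars.splitOn.go]
        have hpre : [' '].isPrefixOf (c :: rest) = false := by
          simp [List.isPrefixOf]
          exact fun hc => hsp hc.symm
        rw [hpre]
        simp only [Bool.false_eq_true, if_false]
        rw [ih rest (c :: cur) accL (by simpa using Nat.le_of_succ_le_succ h)]
        simp [pvSplit, hsp]

theorem pvSplitOn_eq (cs : List Char) : PySem.Chars.splitOn cs [' '] = pvSplit [] cs := by
  rw [PySem.Chars.splitOn, pvGo_eq (cs.length + 1) cs [] [] (Nat.le_succ _)]
  simp

theorem pvSplit_map (repl : Char → List Char) : ∀ (cs cur : List Char),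
    (pvSplit cur cs).map (fun w => w.flatMap repl) = pvOut repl (cur.flatMap repl) cs := by
  intro cs
  induction cs with
  | nil => intro cur; simp [pvSplit, pvOut]
  | cons c rest ih =>
    intro cur
    by_cases hsp : c = ' '
    · simp [pvSplit, pvOut, hsp, ih]
    · simp [pvSplit, pvOut, hsp, ih, List.flatMap_append]

theorem pvLoop_eq (old new : List Char) : ∀ (cs : List Char) (res : List (List Char)) (cur : List Char),
    (cs.foldl
      (fun (st : List (List Char) × List Char) (i : Char) =>
        if i = ' ' then (st.1 ++ [st.2], [])
        else if old = [i] then (st.1, st.2 ++ new)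
        else (st.1, st.2 ++ [i]))
      (res, cur)).1 ++
    [(cs.foldl
      (fun (st : List (List Char) × List Char) (i : Char) =>
        if i = ' ' then (st.1 ++ [st.2], [])
        else if old = [i] then (st.1, st.2 ++ new)
        else (st.1, st.2 ++ [i]))
      (res, cur)).2]
    = res ++ pvOut (fun c => if old = [c] then new else [c]) cur cs := by
  intro cs
  induction cs with
  | nil => intro res cur; simp [pvOut]
  | cons c rest ih =>
    intro res cur
    simp only [List.foldl_cons]
    by_cases hsp : c = ' '
    · rw [if_pos hsp, ih]
      simp [pvOut, hsp, List.append_assoc]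
    · rw [if_neg hsp]
      by_cases hol : old = [c]
      · rw [if_pos hol, ih]
        simp [pvOut, hsp, hol]
      · rw [if_neg hol, ih]
        simp [pvOut, hsp, hol]

-- ===== VERDICT (by name: the statement is the Claim_ definition above) =====
theorem manual_replace_spec : Claim_equal_manual_replace := by
  intro ws old new _
  unfold Spec_manual_replace manual_replace manual_replace_alt
  simp only [pvSplitOn_eq, pvLoop_eq, List.nil_append]
  have h := pvSplit_map (fun c => if old.toList = [c] then new.toList else [c])
      (PySem.Str.join " " ws).toList []
  simp only [List.flatMap_nil] at h
  rw [← h, List.map_map]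
  rfl
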